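-- pv_equiv track=rewrite | github.com/izzet/cladia | dfdiagnoser_ml/common.py | layer_key
-- ===== SOURCE A (Python) =====
-- from typing import Dict, List, Optional
--
-- LAYER_NAMES: List[str] = [
--     "app",
--     "training",
--     "epoch",
--     "compute",
--     "fetch_data",
--     "data_loader",
--     "data_loader_fork",
--     "reader",
--     "reader_posix_lustre",
--     "checkpoint",
--     "checkpoint_posix_lustre",
--     "checkpoint_posix_ssd",
--     "other_posix",
--     "other_posix_lustre",
--     "other_posix_ssd",
-- ]
--
-- def layer_key(feature_name: str) -> str:
--     n = feature_name
--     if n.startswith("u_") or n.startswith("o_"):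
--         n = n.split("_", 1)[1]
--     candidates = sorted(LAYER_NAMES, key=len, reverse=True)
--     for layer in candidates:
--         if n.startswith(layer + "_") or n == layer:
--             return layer
--     parts = n.split("_")
--     return parts[0] if parts else n
-- ===== SOURCE B (Python) =====
-- from typing import List
--
-- LAYER_NAMES: List[str] = [
--     "app",
--     "training",
--     "epoch",
--     "compute",
--     "fetch_data",
--     "data_loader",
--     "data_loader_fork",
--     "reader",
--     "reader_posix_lustre",
--     "checkpoint",
--     "checkpoint_posix_lustre",
--     "checkpoint_posix_ssd",
--     "other_posix",
--     "other_posix_lustre",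
--     "other_posix_ssd",
-- ]
--
-- _LAYER_SET = frozenset(LAYER_NAMES)
--
-- def layer_key(feature_name: str) -> str:
--     n = feature_name
--     if n.startswith("u_") or n.startswith("o_"):
--         n = n.split("_", 1)[1]
--     parts = n.split("_")
--     for k in range(len(parts), 0, -1):
--         candidate = "_".join(parts[:k])
--         if candidate in _LAYER_SET:
--             return candidate
--     return parts[0]
-- ===== Notes on version B (the rewrite author's own statement) =====
-- stated objective: idiomatic
-- what changed: Instead of sorting the fixed layer list by length and testing each layer as a prefix of the name, B splits the name at underscores once and probes its own word-boundary prefixes, longest first, against a frozenset of layer names.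
import Mathlib
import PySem

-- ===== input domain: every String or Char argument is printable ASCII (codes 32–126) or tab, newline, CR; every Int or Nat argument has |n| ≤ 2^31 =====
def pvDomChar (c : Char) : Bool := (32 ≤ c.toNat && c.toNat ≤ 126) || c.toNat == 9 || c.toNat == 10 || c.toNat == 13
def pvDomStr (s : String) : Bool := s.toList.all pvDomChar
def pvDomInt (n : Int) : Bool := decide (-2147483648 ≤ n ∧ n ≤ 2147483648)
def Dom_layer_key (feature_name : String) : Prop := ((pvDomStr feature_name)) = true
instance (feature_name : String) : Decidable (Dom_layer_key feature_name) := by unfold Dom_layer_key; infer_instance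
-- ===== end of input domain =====

-- B replaces A's sort-the-layer-list-and-prefix-test scan by probing the name's own
-- word-boundary prefixes (longest first) against a set of layer names (idiomatic rewrite).


def pvLayerNames : List String :=
  ["app", "training", "epoch", "compute", "fetch_data", "data_loader",
   "data_loader_fork", "reader", "reader_posix_lustre", "checkpoint",
   "checkpoint_posix_lustre", "checkpoint_posix_ssd", "other_posix",
   "other_posix_lustre", "other_posix_ssd"]

-- ===== PORT A =====
-- the 'for layer in candidates: …' loop (returns the first matching layer, none if no match)
def pvALoop (n : String) : List String → Option String
  | [] => none
  | layer :: rest =>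
    if PySem.Str.startswith n (layer ++ "_") || n == layer then some layer
    else pvALoop n rest

def layer_key (feature_name : String) : String :=
  let n := feature_name
  let n := if PySem.Str.startswith n "u_" || PySem.Str.startswith n "o_" then
      PySem.List.pyGetD ((PySem.Str.splitMax? n "_" 1).getD []) 1 n
    else n
  let candidates := PySem.List.sorted pvLayerNames (fun s => PySem.Str.len s) true
  match pvALoop n candidates with
  | some layer => layer
  | none =>
    let parts := (PySem.Str.split? n "_").getD []
    if parts.isEmpty then n else PySem.List.pyGetD parts 0 n

-- ===== PORT B =====
def pvLayerSet : PySem.Set String := PySem.Set.ofList pvLayerNames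

-- the 'for k in range(len(parts), 0, -1): …' loop (first candidate found in the set)
def pvBLoop (parts : List String) : Nat → Option String
  | 0 => none
  | Nat.succ k =>
    let candidate := PySem.Str.join "_" (PySem.List.slice parts none (some ((k + 1 : Nat) : Int)))
    if pvLayerSet.contains candidate then some candidate
    else pvBLoop parts k

def layer_key_alt (feature_name : String) : String :=
  let n := feature_name
  let n := if PySem.Str.startswith n "u_" || PySem.Str.startswith n "o_" then
      PySem.List.pyGetD ((PySem.Str.splitMax? n "_" 1).getD []) 1 n
    else n
  let parts := (PySem.Str.split? n "_").getD []
  match pvBLoop parts parts.length with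
  | some candidate => candidate
  | none => PySem.List.pyGetD parts 0 n

-- ===== PRECONDITION & SPEC =====
def Spec_layer_key (feature_name : String) (out : String) : Prop := out = layer_key_alt feature_name
instance (feature_name : String) (out : String) : Decidable (Spec_layer_key feature_name out) := by unfold Spec_layer_key; infer_instance

-- ===== CLAIM (what is proved, stated in full; the proofs are below) =====
def Claim_equal_layer_key : Prop := ∀ (feature_name : String), Dom_layer_key feature_name → Spec_layer_key feature_name (layer_key feature_name)

-- ===== LEMMAS AND PROOFS =====
-- splitU/joinU: structural characterisations of Python's str.split('_') / '_'.join
def splitU : List Char → List (List Char)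
  | [] => [[]]
  | c :: rest => if c = '_' then [] :: splitU rest else List.modifyHead (c :: ·) (splitU rest)

def joinU : List (List Char) → List Char
  | [] => []
  | [p] => p
  | p :: ps => p ++ '_' :: joinU ps

theorem splitU_shape (l : List Char) : ∃ p ps, splitU l = p :: ps := by
  match l with
  | [] => exact ⟨[], [], rfl⟩
  | c :: rest =>
    obtain ⟨p, ps, h⟩ := splitU_shape rest
    by_cases hc : c = '_'
    · exact ⟨[], splitU rest, by simp [splitU, hc]⟩
    · exact ⟨c :: p, ps, by simp [splitU, hc, h]⟩

theorem length_splitU_pos (l : List Char) : 0 < (splitU l).length := by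
  obtain ⟨p, ps, h⟩ := splitU_shape l; simp [h]

theorem joinU_cons_cons (p q : List Char) (rest : List (List Char)) :
    joinU (p :: q :: rest) = p ++ '_' :: joinU (q :: rest) := rfl

theorem joinU_eq_intercalate (ps : List (List Char)) : joinU ps = List.intercalate ['_'] ps := by
  match ps with
  | [] => simp [joinU, List.intercalate]
  | [p] => simp [joinU, List.intercalate]
  | p :: q :: rest =>
    have ih := joinU_eq_intercalate (q :: rest)
    rw [joinU_cons_cons, ih]
    simp [List.intercalate]

theorem joinU_splitU (l : List Char) : joinU (splitU l) = l := by
  match l with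
  | [] => rfl
  | c :: rest =>
    have ih := joinU_splitU rest
    obtain ⟨p, ps, h⟩ := splitU_shape rest
    by_cases hc : c = '_'
    · subst hc
      rw [h] at ih
      rw [splitU, if_pos rfl, h, joinU_cons_cons, List.nil_append, ih]
    · simp only [splitU, if_neg hc, h, List.modifyHead]
      rw [h] at ih
      cases ps with
      | nil => simp only [joinU] at ih ⊢; simp [ih]
      | cons q qs => simp only [joinU] at ih ⊢; simp [ih]

theorem go_spec : ∀ (fuel : Nat) (l cur : List Char) (acc : List (List Char)), l.length < fuel →
    PySem.Chars.splitOn.go ['_'] fuel l cur acc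
      = acc.reverse ++ List.modifyHead (cur.reverse ++ ·) (splitU l)
  | fuel + 1, [], cur, acc, _ => by
      simp [PySem.Chars.splitOn.go, splitU]
  | fuel + 1, c :: rest, cur, acc, h => by
      have hrest : rest.length < fuel := by simpa using h
      by_cases hc : c = '_'
      · subst hc
        rw [PySem.Chars.splitOn.go]
        simp only [List.isPrefixOf, BEq.rfl, Bool.true_and, List.isPrefixOf_nil_left, if_pos]
        rw [show List.drop ['_'].length ('_' :: rest) = rest from rfl]
        rw [go_spec fuel rest [] (cur.reverse :: acc) hrest]
        obtain ⟨p, ps, hps⟩ := splitU_shape rest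
        simp [splitU, hps]
      · rw [PySem.Chars.splitOn.go]
        have : List.isPrefixOf ['_'] (c :: rest) = false := by
          simp [List.isPrefixOf]
          intro hco; exact absurd hco.symm hc
        rw [this]
        simp only [Bool.false_eq_true, if_false]
        rw [go_spec fuel rest (c :: cur) acc hrest]
        obtain ⟨p, ps, hps⟩ := splitU_shape rest
        simp [splitU, hc, hps]

theorem splitOn_eq_splitU (l : List Char) : PySem.Chars.splitOn l ['_'] = splitU l := by
  unfold PySem.Chars.splitOn
  rw [go_spec (l.length + 1) l [] [] (by omega)]
  obtain ⟨p, ps, hps⟩ := splitU_shape l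
  simp [hps]

theorem joinU_take_cons (c0 : Char) (p : List Char) (ps : List (List Char)) (k : Nat) (hk : 1 ≤ k) :
    joinU (((c0 :: p) :: ps).take k) = c0 :: joinU ((p :: ps).take k) := by
  cases k with
  | zero => omega
  | succ k =>
    simp only [List.take_succ_cons]
    cases hps : ps.take k with
    | nil => simp [joinU]
    | cons q qs => rw [joinU_cons_cons, joinU_cons_cons]; simp

theorem length_splitU_underscore (rest : List Char) :
    (splitU ('_' :: rest)).length = (splitU rest).length + 1 := by
  simp [splitU]

theorem length_splitU_other {c : Char} (hc : c ≠ '_') (rest : List Char) :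
    (splitU (c :: rest)).length = (splitU rest).length := by
  simp [splitU, hc]

theorem bprefix_iff : ∀ (l c : List Char),
    (c ++ ['_'] <+: l) ↔ ∃ k, 1 ≤ k ∧ k < (splitU l).length ∧ c = joinU ((splitU l).take k)
  | [], c => by
    constructor
    · intro h
      have := List.prefix_nil.mp h
      simp at this
    · rintro ⟨k, hk1, hk2, -⟩
      simp [splitU] at hk2; omega
  | c0 :: rest, c => by
    by_cases hc0 : c0 = '_'
    · subst hc0
      constructor
      · intro h
        cases c with
        | nil =>
          refine ⟨1, le_refl 1, ?_, ?_⟩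
          · rw [length_splitU_underscore]; have := length_splitU_pos rest; omega
          · simp [splitU, joinU]
        | cons d c' =>
          rw [List.cons_append, List.cons_prefix_cons] at h
          obtain ⟨hd, h'⟩ := h
          obtain ⟨k, hk1, hk2, hc⟩ := (bprefix_iff rest c').mp h'
          refine ⟨k + 1, by omega, by rw [length_splitU_underscore]; omega, ?_⟩
          obtain ⟨p, ps, hps⟩ := splitU_shape rest
          rw [hps] at hc hk2
          simp only [splitU, if_pos rfl, if_true, hps, List.take_succ_cons]
          have : (p :: ps).take k ≠ [] := by
            cases k with
            | zero => omega
            | succ k => simp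
          cases htk : (p :: ps).take k with
          | nil => exact absurd htk this
          | cons q qs =>
            rw [joinU_cons_cons]
            rw [htk] at hc
            simp [hd, hc]
      · rintro ⟨k, hk1, hk2, hc⟩
        cases k with
        | zero => omega
        | succ k =>
          obtain ⟨p, ps, hps⟩ := splitU_shape rest
          simp only [splitU, if_pos rfl, if_true, hps, List.take_succ_cons] at hc
          cases k with
          | zero =>
            simp [joinU] at hc
            subst hc
            simp [List.cons_prefix_cons]
          | succ k =>
            have hk2' : k + 1 < (splitU rest).length := by
              rw [length_splitU_underscore] at hk2; omega
            have : (p :: ps).take (k+1) = p :: ps.take k := by simp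
            rw [this, joinU_cons_cons] at hc
            subst hc
            simp only [List.nil_append, List.cons_append, List.cons_prefix_cons]
            refine ⟨trivial, (bprefix_iff rest _).mpr ⟨k + 1, by omega, hk2', ?_⟩⟩
            rw [hps]; simp
    · constructor
      · intro h
        cases c with
        | nil =>
          simp only [List.nil_append] at h
          rw [List.cons_prefix_cons] at h
          exact absurd h.1.symm hc0
        | cons d c' =>
          rw [List.cons_append, List.cons_prefix_cons] at h
          obtain ⟨hd, h'⟩ := h
          obtain ⟨k, hk1, hk2, hc⟩ := (bprefix_iff rest c').mp h'
          refine ⟨k, hk1, by rw [length_splitU_other hc0]; omega, ?_⟩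
          obtain ⟨p, ps, hps⟩ := splitU_shape rest
          simp only [splitU, if_neg hc0, hps, List.modifyHead]
          rw [joinU_take_cons c0 p ps k hk1, ← hps, ← hc, hd]
      · rintro ⟨k, hk1, hk2, hc⟩
        obtain ⟨p, ps, hps⟩ := splitU_shape rest
        simp only [splitU, if_neg hc0, hps, List.modifyHead] at hc hk2
        rw [joinU_take_cons c0 p ps k hk1] at hc
        subst hc
        rw [List.cons_append, List.cons_prefix_cons]
        refine ⟨rfl, (bprefix_iff rest _).mpr ⟨k, hk1, ?_, by rw [hps]⟩⟩
        rw [hps]; simpa using hk2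

theorem joinU_cons_ne (p : List Char) (xs : List (List Char)) (h : xs ≠ []) :
    joinU (p :: xs) = p ++ '_' :: joinU xs := by
  cases xs with
  | nil => exact absurd rfl h
  | cons q qs => rw [joinU_cons_cons]

theorem joinU_take_succ : ∀ (ps : List (List Char)) (k : Nat), 1 ≤ k → (h : k < ps.length) →
    joinU (ps.take (k + 1)) = joinU (ps.take k) ++ '_' :: ps.get ⟨k, h⟩
  | p :: ps', 1, _, h => by
    have hps' : 0 < ps'.length := by simpa using h
    cases ps' with
    | nil => simp at hps'
    | cons q qs => simp [joinU, joinU_cons_cons]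
  | p :: ps', (k + 2), _, h => by
    have h' : k + 1 < ps'.length := by simpa using h
    have hne : ps'.take (k + 2) ≠ [] := by
      cases ps' with | nil => simp at h' | cons q qs => simp
    have hne' : ps'.take (k + 1) ≠ [] := by
      cases ps' with | nil => simp at h' | cons q qs => simp
    simp only [List.take_succ_cons]
    rw [joinU_cons_ne p _ hne, joinU_cons_ne p _ hne',
        joinU_take_succ ps' (k + 1) (by omega) h']
    simp

theorem joinU_take_step (ps : List (List Char)) (k : Nat) (hk : 1 ≤ k) (h : k < ps.length) :
    (joinU (ps.take k)).length < (joinU (ps.take (k + 1))).length := by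
  rw [joinU_take_succ ps k hk h]
  simp

theorem joinU_take_mono (ps : List (List Char)) (k1 k2 : Nat) (h1 : 1 ≤ k1) (h12 : k1 < k2)
    (h2 : k2 ≤ ps.length) : (joinU (ps.take k1)).length < (joinU (ps.take k2)).length := by
  induction k2 with
  | zero => omega
  | succ k2 ih =>
    by_cases hk : k1 = k2
    · subst hk; exact joinU_take_step ps k1 h1 (by omega)
    · have := ih (by omega) (by omega)
      have := joinU_take_step ps k2 (by omega) (by omega)
      omega

def pvSortedLit : List String :=
  ["checkpoint_posix_lustre", "checkpoint_posix_ssd", "reader_posix_lustre", "other_posix_lustre",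
   "data_loader_fork", "other_posix_ssd", "data_loader", "other_posix", "fetch_data", "checkpoint",
   "training", "compute", "reader", "epoch", "app"]

theorem sorted_eq : PySem.List.sorted pvLayerNames (fun s => PySem.Str.len s) true = pvSortedLit := by decide
theorem pairwise_lit : List.Pairwise (fun a b : String => b.toList.length ≤ a.toList.length) pvSortedLit := by decide
theorem mem_lit_iff (x : String) : x ∈ pvSortedLit ↔ x ∈ pvLayerNames := by
  simp [pvSortedLit, pvLayerNames]; tauto
theorem partsOf_map (n : String) :
    ((PySem.Str.split? n "_").getD []).map String.toList = splitU n.toList := by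
  have h := PySem.Str.split?_map n "_"
  rw [show ("_" : String).toList = ['_'] from rfl] at h
  rw [PySem.Chars.split?] at h
  simp only [List.isEmpty_cons, if_false, Bool.false_eq_true] at h
  rw [splitOn_eq_splitU] at h
  cases hs : PySem.Str.split? n "_" with
  | none => rw [hs] at h; simp at h
  | some parts => rw [hs] at h; simpa using h

theorem parts_length (n : String) :
    ((PySem.Str.split? n "_").getD []).length = (splitU n.toList).length := by
  have := congrArg List.length (partsOf_map n)
  simpa using this

def candOf (parts : List String) (k : Nat) : String := PySem.Str.join "_" (parts.take k)

theorem candOf_toList (n : String) (k : Nat) :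
    (candOf ((PySem.Str.split? n "_").getD []) k).toList = joinU ((splitU n.toList).take k) := by
  rw [candOf, PySem.Str.toList_join, show ("_" : String).toList = ['_'] from rfl,
      PySem.Chars.join, joinU_eq_intercalate, ← partsOf_map n]
  congr 1
  simp [List.map_take]

theorem contains_iff (c : String) : pvLayerSet.contains c = true ↔ c ∈ pvLayerNames := by
  rw [pvLayerSet, PySem.Set.contains]
  rw [show PySem.Set.ofList pvLayerNames = pvLayerNames from by decide]
  exact List.contains_iff_mem

theorem pred_iff (n l : String) :
    (PySem.Str.startswith n (l ++ "_") || n == l) = true ↔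
      ∃ k, 1 ≤ k ∧ k ≤ (splitU n.toList).length ∧ l.toList = joinU ((splitU n.toList).take k) := by
  rw [Bool.or_eq_true, PySem.Str.startswith_eq, PySem.Chars.startswith_iff, beq_iff_eq,
      String.toList_append, show ("_" : String).toList = ['_'] from rfl]
  constructor
  · rintro (h | h)
    · obtain ⟨k, hk1, hk2, hc⟩ := (bprefix_iff n.toList l.toList).mp h
      exact ⟨k, hk1, by omega, hc⟩
    · subst h
      refine ⟨(splitU n.toList).length, length_splitU_pos n.toList, le_refl _, ?_⟩
      rw [List.take_length, joinU_splitU]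
  · rintro ⟨k, hk1, hk2, hc⟩
    rcases lt_or_eq_of_le hk2 with hlt | heq
    · exact Or.inl ((bprefix_iff n.toList l.toList).mpr ⟨k, hk1, hlt, hc⟩)
    · right
      rw [heq, List.take_length, joinU_splitU] at hc
      exact (String.toList_inj.mp hc).symm

theorem aLoop_none_iff (n : String) (L : List String) :
    pvALoop n L = none ↔ ∀ l ∈ L, (PySem.Str.startswith n (l ++ "_") || n == l) = false := by
  induction L with
  | nil => simp [pvALoop]
  | cons x xs ih =>
    rw [pvALoop]
    by_cases hx : (PySem.Str.startswith n (x ++ "_") || n == x) = true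
    · rw [if_pos hx]
      constructor
      · intro h; cases h
      · intro h
        have := h x List.mem_cons_self
        rw [this] at hx; cases hx
    · rw [if_neg hx, ih, List.forall_mem_cons]
      exact ⟨fun h => ⟨Bool.not_eq_true _ ▸ hx, h⟩, fun h => h.2⟩

theorem aLoop_some (n : String) (L : List String) (m : String) (h : pvALoop n L = some m) :
    m ∈ L ∧ (PySem.Str.startswith n (m ++ "_") || n == m) = true := by
  induction L with
  | nil => simp [pvALoop] at h
  | cons x xs ih =>
    rw [pvALoop] at h
    by_cases hx : (PySem.Str.startswith n (x ++ "_") || n == x) = true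
    · rw [if_pos hx] at h
      obtain rfl : x = m := by simpa using h
      exact ⟨List.mem_cons_self, hx⟩
    · rw [if_neg hx] at h
      obtain ⟨h1, h2⟩ := ih h
      exact ⟨List.mem_cons_of_mem x h1, h2⟩

theorem aLoop_best (n : String) (L : List String) (m : String)
    (hp : List.Pairwise (fun a b : String => b.toList.length ≤ a.toList.length) L)
    (h : pvALoop n L = some m) (x : String) (hx : x ∈ L)
    (hpx : (PySem.Str.startswith n (x ++ "_") || n == x) = true) :
    x.toList.length ≤ m.toList.length := by
  induction L with
  | nil => simp [pvALoop] at h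
  | cons y ys ih =>
    rw [pvALoop] at h
    by_cases hy : (PySem.Str.startswith n (y ++ "_") || n == y) = true
    · rw [if_pos hy] at h
      obtain rfl : y = m := by simpa using h
      rcases List.mem_cons.mp hx with rfl | hx'
      · exact le_refl _
      · exact (List.pairwise_cons.mp hp).1 x hx'
    · rw [if_neg hy] at h
      rcases List.mem_cons.mp hx with rfl | hx'
      · exact absurd hpx hy
      · exact ih (List.pairwise_cons.mp hp).2 h hx'

theorem bLoop_succ (parts : List String) (k : Nat) :
    pvBLoop parts (k + 1) =
      if pvLayerSet.contains (candOf parts (k + 1)) then some (candOf parts (k + 1))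
      else pvBLoop parts k := by
  rw [pvBLoop]
  simp only [PySem.List.slice_to_natCast, candOf]

theorem bLoop_none_iff (parts : List String) (j : Nat) :
    pvBLoop parts j = none ↔
      ∀ k, 1 ≤ k → k ≤ j → pvLayerSet.contains (candOf parts k) = false := by
  induction j with
  | zero => simp [pvBLoop]; omega
  | succ j ih =>
    rw [bLoop_succ]
    by_cases hc : pvLayerSet.contains (candOf parts (j + 1)) = true
    · simp only [hc, if_true]
      constructor
      · intro h; exact absurd h (by simp)
      · intro h; rw [h (j + 1) (by omega) (le_refl _)] at hc; simp at hc
    · simp only [Bool.not_eq_true] at hc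
      rw [hc]
      simp only [Bool.false_eq_true, if_false, ih]
      constructor
      · intro h k hk1 hk2
        rcases Nat.lt_or_ge k (j + 1) with hlt | hge
        · exact h k hk1 (by omega)
        · have : k = j + 1 := by omega
          subst this; exact hc
      · intro h k hk1 hk2; exact h k hk1 (by omega)

theorem bLoop_some (parts : List String) (j : Nat) (c : String) (h : pvBLoop parts j = some c) :
    ∃ k, 1 ≤ k ∧ k ≤ j ∧ c = candOf parts k ∧ pvLayerSet.contains c = true ∧
      ∀ k', k < k' → k' ≤ j → pvLayerSet.contains (candOf parts k') = false := by
  induction j with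
  | zero => simp [pvBLoop] at h
  | succ j ih =>
    rw [bLoop_succ] at h
    by_cases hc : pvLayerSet.contains (candOf parts (j + 1)) = true
    · rw [if_pos hc] at h
      obtain rfl : candOf parts (j + 1) = c := by simpa using h
      exact ⟨j + 1, by omega, le_refl _, rfl, hc, by intro k' h1 h2; omega⟩
    · simp only [Bool.not_eq_true] at hc
      rw [hc] at h
      simp only [Bool.false_eq_true, if_false] at h
      obtain ⟨k, hk1, hk2, hck, hcc, hmax⟩ := ih h
      refine ⟨k, hk1, by omega, hck, hcc, ?_⟩
      intro k' h1 h2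
      rcases Nat.lt_or_ge k' (j + 1) with hlt | hge
      · exact hmax k' h1 (by omega)
      · have : k' = j + 1 := by omega
        subst this; exact hc

theorem core_eq (f : String) : layer_key f = layer_key_alt f := by
  simp only [layer_key, layer_key_alt, sorted_eq]
  generalize (if PySem.Str.startswith f "u_" || PySem.Str.startswith f "o_" then
      PySem.List.pyGetD ((PySem.Str.splitMax? f "_" 1).getD []) 1 f else f) = n
  have hlen : ((PySem.Str.split? n "_").getD []).length = (splitU n.toList).length :=
    parts_length n
  have hpos : 0 < (splitU n.toList).length := length_splitU_pos n.toList
  cases haL : pvALoop n pvSortedLit with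
  | none =>
    have hB : pvBLoop ((PySem.Str.split? n "_").getD [])
        ((PySem.Str.split? n "_").getD []).length = none := by
      rw [bLoop_none_iff]
      intro k hk1 hk2
      cases hx : pvLayerSet.contains (candOf ((PySem.Str.split? n "_").getD []) k) with
      | false => rfl
      | true =>
        have hmem : candOf ((PySem.Str.split? n "_").getD []) k ∈ pvSortedLit :=
          (mem_lit_iff _).mpr ((contains_iff _).mp hx)
        have hpred := (aLoop_none_iff n pvSortedLit).mp haL _ hmem
        have : (PySem.Str.startswith n (candOf ((PySem.Str.split? n "_").getD []) k ++ "_") ||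
            n == candOf ((PySem.Str.split? n "_").getD []) k) = true :=
          (pred_iff n _).mpr ⟨k, hk1, by omega, candOf_toList n k⟩
        rw [hpred] at this; cases this
    rw [hB]
    have hne : ((PySem.Str.split? n "_").getD []).isEmpty = false := by
      cases hp : (PySem.Str.split? n "_").getD [] with
      | nil => rw [hp] at hlen; simp at hlen; omega
      | cons q qs => rfl
    rw [hne]
    simp
  | some m =>
    obtain ⟨hmem, hpred⟩ := aLoop_some n pvSortedLit m haL
    obtain ⟨km, hkm1, hkm2, hmtl⟩ := (pred_iff n m).mp hpred
    have hmc : m = candOf ((PySem.Str.split? n "_").getD []) km :=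
      String.toList_inj.mp (by rw [hmtl, candOf_toList])
    have hcontm : pvLayerSet.contains (candOf ((PySem.Str.split? n "_").getD []) km) = true := by
      rw [← hmc]; exact (contains_iff m).mpr ((mem_lit_iff m).mp hmem)
    cases hbL : pvBLoop ((PySem.Str.split? n "_").getD [])
        ((PySem.Str.split? n "_").getD []).length with
    | none =>
      have := (bLoop_none_iff _ _).mp hbL km hkm1 (by omega)
      rw [this] at hcontm; cases hcontm
    | some c =>
      show m = c
      obtain ⟨kb, hkb1, hkb2, hckb, hcontc, hmax⟩ := bLoop_some _ _ c hbL
      have hkmkb : km ≤ kb := by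
        by_contra hgt
        have := hmax km (by omega) (by omega)
        rw [this] at hcontm; cases hcontm
      have hctl : c.toList = joinU ((splitU n.toList).take kb) := by
        rw [hckb, candOf_toList]
      have hpredc : (PySem.Str.startswith n (c ++ "_") || n == c) = true :=
        (pred_iff n c).mpr ⟨kb, hkb1, by omega, hctl⟩
      have hcmem : c ∈ pvSortedLit := (mem_lit_iff c).mpr ((contains_iff c).mp hcontc)
      have hbest := aLoop_best n pvSortedLit m pairwise_lit haL c hcmem hpredc
      have hkeq : km = kb := by
        by_contra hne
        have hklt : km < kb := by omega
        have := joinU_take_mono (splitU n.toList) km kb hkm1 hklt (by omega)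
        rw [← hmtl, ← hctl] at this
        omega
      exact (String.toList_inj.mp (by rw [hctl, ← hkeq, ← hmtl])).symm

-- ===== VERDICT (by name: the statement is the Claim_ definition above) =====
theorem layer_key_spec : Claim_equal_layer_key := by
  intro feature_name _
  unfold Spec_layer_key
  exact core_eq feature_name
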